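-- pv_equiv track=rewrite | github.com/Haru8-8/shift-optimizer | optimizer.py | analyze_infeasible
-- ===== SOURCE A (Python) =====
-- from collections import defaultdict
--
-- def analyze_infeasible(
--     availability: set,
--     shifts: dict,
--     staff_constraints: dict,
--     fixed_assignments: set,
--     staff_skills: dict = None,
--     shift_skills: dict = None,
-- ) -> list:
--     """
--     求解不能になりうる原因を分析してメッセージのリストを返す。
--     solve() が Infeasible を返したときに呼び出す。
--     """
--     reasons = []
--
--     # --- パターン1: 供給人数 < 必要人数 ---
--     for (day, slot), required in shifts.items():
--         available_count = sum(
--             1 for name, d, s in availability if d == day and s == slot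
--         )
--         if available_count < required:
--             reasons.append(
--                 f"{day} {slot}: 必要人数 {required} 名に対して出勤可能なスタッフが {available_count} 名しかいません。"
--             )
--
--     # --- パターン2: min_shifts の合計 > 割り当て可能総数 ---
--     total_min = sum(
--         c["min_shifts"] for c in staff_constraints.values()
--         if c.get("min_shifts") is not None
--     )
--     # 各スタッフの最大割り当て可能数（1日1枠なので出勤可能な日数が上限）
--     staff_names = {name for name, _, _ in availability}
--     total_capacity = sum(
--         len({day for name2, day, slot in availability if name2 == name})
--         for name in staff_names
--     )
--     if total_min > total_capacity:
--         reasons.append(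
--             f"min_shifts の合計 ({total_min}) が全スタッフの出勤可能日数の合計 ({total_capacity}) を超えています。"
--         )
--
--     # --- パターン3: fixed_assignments の重複（同一スタッフ同一日に複数固定） ---
--     fixed_by_name_day = defaultdict(list)
--     for name, day, slot in fixed_assignments:
--         fixed_by_name_day[(name, day)].append(slot)
--     for (name, day), slots in fixed_by_name_day.items():
--         if len(slots) > 1:
--             reasons.append(
--                 f"固定割り当て: {name} の {day} に複数の枠 ({', '.join(slots)}) が固定されています。"
--                 f"1人1日1枠までしか割り当てできません。"
--             )
--
--     # --- パターン4: スキル制約で供給不足 ---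
--     if staff_skills and shift_skills:
--         for (day, slot), skill_reqs in shift_skills.items():
--             for skill, req in skill_reqs.items():
--                 capable = sum(
--                     1 for name, d, s in availability
--                     if d == day and s == slot and skill in staff_skills.get(name, set())
--                 )
--                 if capable < req:
--                     reasons.append(
--                         f"{day} {slot}: スキル '{skill}' を持つ出勤可能スタッフが {capable} 名しかいませんが {req} 名必要です。"
--                     )
--
--     if not reasons:
--         reasons.append(
--             "自動検出できませんでした。制約の組み合わせが複雑な可能性があります。"
--             "max_consecutive や min_shifts を緩めてみてください。"
--         )
--
--     return reasons
-- ===== SOURCE B (Python) =====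
-- from collections import Counter, defaultdict
--
-- def analyze_infeasible(
--     availability: set,
--     shifts: dict,
--     staff_constraints: dict,
--     fixed_assignments: set,
--     staff_skills: dict = None,
--     shift_skills: dict = None,
-- ) -> list:
--     """Builds each diagnostic section as a comprehension over pre-computed
--     counters (one pass over availability each), then concatenates the sections,
--     instead of growing one list while rescanning availability per check."""
--     sections = []
--
--     supply = Counter((d, s) for _name, d, s in availability)
--     sections.append([
--         f"{day} {slot}: 必要人数 {required} 名に対して出勤可能なスタッフが {supply[(day, slot)]} 名しかいません。"
--         for (day, slot), required in shifts.items()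
--         if supply[(day, slot)] < required
--     ])
--
--     mins = [c.get("min_shifts") for c in staff_constraints.values()]
--     total_min = sum(v for v in mins if v is not None)
--     # capacity = number of distinct (name, day) pairs (1 slot per person per day)
--     total_capacity = len({(name, day) for name, day, _slot in availability})
--     sections.append(
--         [f"min_shifts の合計 ({total_min}) が全スタッフの出勤可能日数の合計 ({total_capacity}) を超えています。"]
--         if total_min > total_capacity else []
--     )
--
--     grouped = defaultdict(list)
--     for name, day, slot in fixed_assignments:
--         grouped[(name, day)].append(slot)
--     sections.append([
--         f"固定割り当て: {name} の {day} に複数の枠 ({', '.join(slots)}) が固定されています。1人1日1枠までしか割り当てできません。"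
--         for (name, day), slots in grouped.items()
--         if len(slots) > 1
--     ])
--
--     if staff_skills and shift_skills:
--         skillsets = {name: set(sks) for name, sks in staff_skills.items()}
--         capable = Counter(
--             (d, s, skill)
--             for name, d, s in availability
--             for skill in skillsets.get(name, ())
--         )
--         sections.append([
--             f"{day} {slot}: スキル '{skill}' を持つ出勤可能スタッフが {capable[(day, slot, skill)]} 名しかいませんが {req} 名必要です。"
--             for (day, slot), skill_reqs in shift_skills.items()
--             for skill, req in skill_reqs.items()
--             if capable[(day, slot, skill)] < req
--         ])
--
--     reasons = [m for sec in sections for m in sec]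
--     return reasons or [
--         "自動検出できませんでした。制約の組み合わせが複雑な可能性があります。"
--         "max_consecutive や min_shifts を緩めてみてください。"
--     ]
-- ===== Notes on version B (the rewrite author's own statement) =====
-- stated objective: faster
-- what changed: B precomputes a (day,slot) Counter, a distinct-(name,day) set and a (day,slot,skill) Counter in single passes over availability, and builds each diagnostic section as a comprehension (filter+map) over those counters, concatenating the sections at the end, instead of A's one growing list with a rescan of availability per shift, per staff name and per skill requirement.
import Mathlib
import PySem

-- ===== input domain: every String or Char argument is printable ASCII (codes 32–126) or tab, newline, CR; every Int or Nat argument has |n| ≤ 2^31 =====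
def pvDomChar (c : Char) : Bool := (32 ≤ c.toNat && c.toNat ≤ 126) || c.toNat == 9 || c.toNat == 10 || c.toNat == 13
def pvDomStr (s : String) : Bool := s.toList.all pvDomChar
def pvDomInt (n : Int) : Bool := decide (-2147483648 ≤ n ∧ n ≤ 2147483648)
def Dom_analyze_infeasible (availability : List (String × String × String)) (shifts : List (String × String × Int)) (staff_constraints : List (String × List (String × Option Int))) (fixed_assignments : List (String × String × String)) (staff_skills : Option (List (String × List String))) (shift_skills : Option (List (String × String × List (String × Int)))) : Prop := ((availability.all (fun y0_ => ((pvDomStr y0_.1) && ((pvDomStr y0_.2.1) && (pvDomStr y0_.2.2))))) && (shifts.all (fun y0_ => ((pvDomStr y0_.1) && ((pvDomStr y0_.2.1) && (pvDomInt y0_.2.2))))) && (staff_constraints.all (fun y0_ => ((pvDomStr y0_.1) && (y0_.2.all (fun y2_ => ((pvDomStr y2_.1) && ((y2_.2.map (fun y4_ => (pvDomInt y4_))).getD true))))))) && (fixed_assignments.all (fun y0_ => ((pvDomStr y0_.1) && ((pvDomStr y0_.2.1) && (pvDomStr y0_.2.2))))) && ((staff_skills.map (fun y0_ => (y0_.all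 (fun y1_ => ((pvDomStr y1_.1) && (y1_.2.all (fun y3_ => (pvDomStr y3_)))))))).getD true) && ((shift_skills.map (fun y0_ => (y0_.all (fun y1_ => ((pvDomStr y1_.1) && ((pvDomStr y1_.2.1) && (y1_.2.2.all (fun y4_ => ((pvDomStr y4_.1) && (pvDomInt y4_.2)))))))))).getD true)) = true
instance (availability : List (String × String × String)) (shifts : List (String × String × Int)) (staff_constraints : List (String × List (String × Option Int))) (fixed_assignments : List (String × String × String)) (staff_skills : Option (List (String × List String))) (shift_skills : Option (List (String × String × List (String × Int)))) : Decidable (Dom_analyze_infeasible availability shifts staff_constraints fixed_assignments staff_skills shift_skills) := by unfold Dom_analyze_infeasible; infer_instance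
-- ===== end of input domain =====

-- B builds each diagnostic section as a filter/map (comprehension) over counters built in one
-- pass over availability, then concatenates the sections; return value proved identical to A's.

-- ===== PORT A =====
-- A's min_shifts accumulation: `sum(c["min_shifts"] for c in staff_constraints.values() if c.get("min_shifts") is not None)`
def pvA_minStep (acc : Int) (kv : String × List (String × Option Int)) : Int :=
  match (PySem.Dict.mk kv.2).get? "min_shifts" with
  | some (some v) => acc + v
  | _ => acc

def pvA_total_min (staff_constraints : List (String × List (String × Option Int))) : Int :=
  staff_constraints.foldl pvA_minStep 0

-- literal transliteration of A; `availability`/`fixed_assignments` are Python sets rendered as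
-- distinct-element lists, dict parameters as insertion-ordered association lists
def analyze_infeasible (availability : List (String × String × String)) (shifts : List (String × String × Int)) (staff_constraints : List (String × List (String × Option Int))) (fixed_assignments : List (String × String × String)) (staff_skills : Option (List (String × List String))) (shift_skills : Option (List (String × String × List (String × Int)))) : List String :=
  -- パターン1: supply < demand, counting availability per shift
  let reasons : List String := shifts.foldl (fun acc kv =>
    let available_count : Int := availability.foldl (fun n p => if p.2.1 == kv.1 && p.2.2 == kv.2.1 then n + 1 else n) 0
    if available_count < kv.2.2 then
      acc ++ [kv.1 ++ " " ++ kv.2.1 ++ ": 必要人数 " ++ PySem.Int.toStr kv.2.2 ++ " 名に対して出勤可能なスタッフが " ++ PySem.Int.toStr available_count ++ " 名しかいません。"]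
    else acc) []
  -- パターン2: total min_shifts vs total capacity
  let total_min : Int := pvA_total_min staff_constraints
  let total_capacity : Int := (PySem.Set.ofList (availability.map (fun p => p.1))).foldl
    (fun acc name => acc + ((PySem.Set.ofList ((availability.filter (fun p => p.1 == name)).map (fun p => p.2.1))).length : Int)) 0
  let reasons := if total_capacity < total_min then
      reasons ++ ["min_shifts の合計 (" ++ PySem.Int.toStr total_min ++ ") が全スタッフの出勤可能日数の合計 (" ++ PySem.Int.toStr total_capacity ++ ") を超えています。"]
    else reasons
  -- パターン3: duplicated fixed assignments (defaultdict(list) grouping)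
  let fixed_by_name_day : PySem.Dict (String × String) (List String) :=
    fixed_assignments.foldl (fun d p => d.modify (p.1, p.2.1) [] (fun l => l ++ [p.2.2])) PySem.Dict.empty
  let reasons := fixed_by_name_day.items.foldl (fun acc kv =>
    if 1 < kv.2.length then
      acc ++ ["固定割り当て: " ++ kv.1.1 ++ " の " ++ kv.1.2 ++ " に複数の枠 (" ++ PySem.Str.join ", " kv.2 ++ ") が固定されています。1人1日1枠までしか割り当てできません。"]
    else acc) reasons
  -- パターン4: skill supply, counting availability per (shift, skill)
  let reasons :=
    match staff_skills, shift_skills with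
    | some sk, some ssk =>
      if !sk.isEmpty && !ssk.isEmpty then
        ssk.foldl (fun acc kv =>
          kv.2.2.foldl (fun acc2 sr =>
            let capable : Int := availability.foldl (fun n p =>
              if p.2.1 == kv.1 && p.2.2 == kv.2.1 && ((PySem.Dict.mk sk).getD p.1 []).contains sr.1 then n + 1 else n) 0
            if capable < sr.2 then
              acc2 ++ [kv.1 ++ " " ++ kv.2.1 ++ ": スキル '" ++ sr.1 ++ "' を持つ出勤可能スタッフが " ++ PySem.Int.toStr capable ++ " 名しかいませんが " ++ PySem.Int.toStr sr.2 ++ " 名必要です。"]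
            else acc2) acc) reasons
      else reasons
    | _, _ => reasons
  if reasons.isEmpty then
    reasons ++ ["自動検出できませんでした。制約の組み合わせが複雑な可能性があります。max_consecutive や min_shifts を緩めてみてください。"]
  else reasons

-- ===== PORT B =====
-- transliteration of Source B: each section is a comprehension (filter + map) over pre-computed
-- counters (PySem.Dict.counter = collections.Counter); the sections list is flattened at the end;
-- `set(staff_skills.get(name, ()))` is PySem.Set.ofList of the looked-up list
def analyze_infeasible_alt (availability : List (String × String × String)) (shifts : List (String × String × Int)) (staff_constraints : List (String × List (String × Option Int))) (fixed_assignments : List (String × String × String)) (staff_skills : Option (List (String × List String))) (shift_skills : Option (List (String × String × List (String × Int)))) : List String :=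
  let supply : PySem.Dict (String × String) Int := PySem.Dict.counter (availability.map (fun p => (p.2.1, p.2.2)))
  let sec1 : List String :=
    (shifts.filter (fun kv => supply.getD (kv.1, kv.2.1) 0 < kv.2.2)).map (fun kv =>
      kv.1 ++ " " ++ kv.2.1 ++ ": 必要人数 " ++ PySem.Int.toStr kv.2.2 ++ " 名に対して出勤可能なスタッフが " ++ PySem.Int.toStr (supply.getD (kv.1, kv.2.1) 0) ++ " 名しかいません。")
  let mins : List (Option Int) := staff_constraints.map (fun kv => ((PySem.Dict.mk kv.2).get? "min_shifts").getD none)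
  let total_min : Int := (mins.filterMap id).sum
  -- capacity = number of distinct (name, day) pairs
  let total_capacity : Int := ((PySem.Set.ofList (availability.map (fun p => (p.1, p.2.1)))).length : Int)
  let sec2 : List String :=
    if total_capacity < total_min then
      ["min_shifts の合計 (" ++ PySem.Int.toStr total_min ++ ") が全スタッフの出勤可能日数の合計 (" ++ PySem.Int.toStr total_capacity ++ ") を超えています。"]
    else []
  let grouped : PySem.Dict (String × String) (List String) :=
    fixed_assignments.foldl (fun d p => d.modify (p.1, p.2.1) [] (fun l => l ++ [p.2.2])) PySem.Dict.empty
  let sec3 : List String :=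
    (grouped.items.filter (fun kv => 1 < kv.2.length)).map (fun kv =>
      "固定割り当て: " ++ kv.1.1 ++ " の " ++ kv.1.2 ++ " に複数の枠 (" ++ PySem.Str.join ", " kv.2 ++ ") が固定されています。1人1日1枠までしか割り当てできません。")
  let sec4 : List String := staff_skills.elim [] (fun sk => shift_skills.elim [] (fun ssk =>
    if !sk.isEmpty && !ssk.isEmpty then
      let skillsets : PySem.Dict String (List String) :=
        PySem.Dict.mk (sk.map (fun kv => (kv.1, PySem.Set.ofList kv.2)))
      let capable : PySem.Dict (String × String × String) Int :=
        PySem.Dict.counter (availability.flatMap (fun p =>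
          (skillsets.getD p.1 []).map (fun skill => (p.2.1, p.2.2, skill))))
      ssk.flatMap (fun kv =>
        (kv.2.2.filter (fun sr => capable.getD (kv.1, kv.2.1, sr.1) 0 < sr.2)).map (fun sr =>
          kv.1 ++ " " ++ kv.2.1 ++ ": スキル '" ++ sr.1 ++ "' を持つ出勤可能スタッフが " ++ PySem.Int.toStr (capable.getD (kv.1, kv.2.1, sr.1) 0) ++ " 名しかいませんが " ++ PySem.Int.toStr sr.2 ++ " 名必要です。"))
    else []))
  let reasons : List String := [sec1, sec2, sec3, sec4].flatten
  if reasons.isEmpty then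
    ["自動検出できませんでした。制約の組み合わせが複雑な可能性があります。max_consecutive や min_shifts を緩めてみてください。"]
  else reasons

-- ===== PRECONDITION & SPEC =====
def Spec_analyze_infeasible (availability : List (String × String × String)) (shifts : List (String × String × Int)) (staff_constraints : List (String × List (String × Option Int))) (fixed_assignments : List (String × String × String)) (staff_skills : Option (List (String × List String))) (shift_skills : Option (List (String × String × List (String × Int)))) (out : List String) : Prop := out = analyze_infeasible_alt availability shifts staff_constraints fixed_assignments staff_skills shift_skills
instance (availability : List (String × String × String)) (shifts : List (String × String × Int)) (staff_constraints : List (String × List (String × Option Int))) (fixed_assignments : List (String × String × String)) (staff_skills : Option (List (String × List String))) (shift_skills : Option (List (String × String × List (String × Int)))) (out : List String) : Decidable (Spec_analyze_infeasible availability shifts staff_constraints fixed_assignments staff_skills shift_skills out) := by unfold Spec_analyze_infeasible; infer_instance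

-- ===== CLAIM (what is proved, stated in full; the proofs are below) =====
def Claim_equal_analyze_infeasible : Prop := ∀ (availability : List (String × String × String)) (shifts : List (String × String × Int)) (staff_constraints : List (String × List (String × Option Int))) (fixed_assignments : List (String × String × String)) (staff_skills : Option (List (String × List String))) (shift_skills : Option (List (String × String × List (String × Int)))), Dom_analyze_infeasible availability shifts staff_constraints fixed_assignments staff_skills shift_skills → Spec_analyze_infeasible availability shifts staff_constraints fixed_assignments staff_skills shift_skills (analyze_infeasible availability shifts staff_constraints fixed_assignments staff_skills shift_skills)

-- ===== LEMMAS AND PROOFS =====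

-- A's min_shifts loop = sum of the non-None entries of B's `mins` list
theorem pv_min_core (l : List (String × List (String × Option Int))) (init : Int) :
    l.foldl pvA_minStep init
      = init + ((l.map (fun kv => ((PySem.Dict.mk kv.2).get? "min_shifts").getD none)).filterMap id).sum := by
  induction l generalizing init with
  | nil => simp
  | cons h t ih =>
    rcases hg : (PySem.Dict.mk h.2).get? "min_shifts" with _ | _ | v <;>
      simp [List.foldl_cons, pvA_minStep, hg, ih]
    ring

theorem pv_min_eq (l : List (String × List (String × Option Int))) :
    pvA_total_min l
      = ((l.map (fun kv => ((PySem.Dict.mk kv.2).get? "min_shifts").getD none)).filterMap id).sum := by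
  rw [pvA_total_min, pv_min_core]; simp

-- the (day, slot) counter looked up = A's per-shift counting loop
theorem pv_supply_eq (availability : List (String × String × String)) (day slot : String) :
    (PySem.Dict.counter (availability.map (fun p => (p.2.1, p.2.2)))).getD (day, slot) 0
      = availability.foldl (fun n p => if p.2.1 == day && p.2.2 == slot then n + 1 else n) 0 := by
  rw [PySem.Dict.getD_counter, PySem.List.foldl_if_add_one, List.count_eq_countP, List.countP_map]
  simp only [zero_add]
  rfl

-- PySem.Set.ofList l is the Nodup enumeration of l.toFinset
theorem pv_ofList_toFinset {α : Type} [BEq α] [LawfulBEq α] [DecidableEq α] (l : List α) :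
    (PySem.Set.ofList l).toFinset = l.toFinset := by
  ext x; simp [PySem.Set.mem_ofList]

theorem pv_len_ofList {α : Type} [BEq α] [LawfulBEq α] [DecidableEq α] (l : List α) :
    (PySem.Set.ofList l).length = l.toFinset.card := by
  rw [← List.toFinset_card_of_nodup (PySem.Set.nodup_ofList l), pv_ofList_toFinset]

-- the fiber of the distinct (name, day) pairs over a name is that name's distinct-day set
theorem pv_fiber (xs : List (String × String × String)) (n : String) :
    ((xs.map (fun p => (p.1, p.2.1))).toFinset.filter (fun q => q.1 = n))
      = ((xs.filter (fun p => p.1 == n)).map (fun p => p.2.1)).toFinset.image (fun d => (n, d)) := by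
  ext ⟨a, b⟩
  simp only [Finset.mem_filter, List.mem_toFinset, List.mem_map, Finset.mem_image, List.mem_filter]
  constructor
  · rintro ⟨⟨p, hp, hpe⟩, rfl⟩
    have h1 : p.1 = a := by simpa using congrArg Prod.fst hpe
    have h2 : p.2.1 = b := by simpa using congrArg Prod.snd hpe
    exact ⟨b, ⟨p, ⟨hp, by simp [h1]⟩, h2⟩, rfl⟩
  · rintro ⟨d, ⟨p, ⟨hp, hpn⟩, hpd⟩, hnd⟩
    have h1 : n = a := by simpa using congrArg Prod.fst hnd
    have h2 : d = b := by simpa using congrArg Prod.snd hnd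
    subst h1; subst h2
    exact ⟨⟨p, hp, by simp [hpd]; simpa using hpn⟩, rfl⟩

-- |set of (name, day) pairs| = A's per-name sum of distinct-day counts (Nat core)
theorem pv_capacity_core (xs : List (String × String × String)) :
    (PySem.Set.ofList (xs.map (fun p => (p.1, p.2.1)))).length
      = ((PySem.Set.ofList (xs.map (fun p => p.1))).map
          (fun n => (PySem.Set.ofList ((xs.filter (fun p => p.1 == n)).map (fun p => p.2.1))).length)).sum := by
  rw [pv_len_ofList]
  rw [← List.sum_toFinset _ (PySem.Set.nodup_ofList (xs.map (fun p => p.1)))]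
  rw [Finset.sum_congr (pv_ofList_toFinset (xs.map (fun p => p.1))) (fun n _ => pv_len_ofList _)]
  rw [Finset.card_eq_sum_card_fiberwise (f := Prod.fst) (t := (xs.map (fun p => p.1)).toFinset)
    (by rintro ⟨a, b⟩ hq
        simp only [Finset.mem_coe, List.mem_toFinset, List.mem_map] at hq ⊢
        obtain ⟨p, hp, hpe⟩ := hq
        exact ⟨p, hp, by simpa using congrArg Prod.fst hpe⟩)]
  refine Finset.sum_congr rfl (fun n _ => ?_)
  rw [show ({a ∈ (xs.map (fun p => (p.1, p.2.1))).toFinset | a.1 = n}) = ((xs.map (fun p => (p.1, p.2.1))).toFinset.filter (fun q => q.1 = n)) from rfl]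
  rw [pv_fiber]
  exact Finset.card_image_of_injective _ (fun a b h => by simpa using h)

-- the Int-level capacity equality the ports use
theorem pv_capacity_eq (xs : List (String × String × String)) :
    ((PySem.Set.ofList (xs.map (fun p => (p.1, p.2.1)))).length : Int)
      = (PySem.Set.ofList (xs.map (fun p => p.1))).foldl
          (fun acc name => acc + ((PySem.Set.ofList ((xs.filter (fun p => p.1 == name)).map (fun p => p.2.1))).length : Int)) 0 := by
  rw [PySem.List.foldl_add]
  simp only [zero_add]
  rw [pv_capacity_core]
  rw [Nat.cast_list_sum, List.map_map]
  rfl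

-- one availability entry contributes 1 to the (day, slot, skill) counter iff A's membership test holds
theorem pv_capable_elem (skills : List String) (day slot skill : String) (p : String × String × String) :
    ((List.countP (fun x => x == (day, slot, skill))
        ((PySem.Set.ofList skills).map (fun s2 => (p.2.1, p.2.2, s2)))) : Int)
      = if p.2.1 == day && p.2.2 == slot && skills.contains skill then 1 else 0 := by
  rw [List.countP_map]
  have hc : ((fun x => x == (day, slot, skill)) ∘ (fun s2 : String => (p.2.1, p.2.2, s2)))
      = (fun s2 => p.2.1 == day && (p.2.2 == slot && (s2 == skill))) := rfl
  rw [hc]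
  cases hd : (p.2.1 == day) <;> cases hs : (p.2.2 == slot) <;>
    simp only [Bool.false_and, Bool.true_and, Bool.and_false, Bool.and_true, List.countP_false,
      if_false, Bool.false_eq_true] <;> try simp
  rw [← List.count_eq_countP]
  by_cases hm : skill ∈ skills
  · rw [List.count_eq_one_of_mem (PySem.Set.nodup_ofList skills) ((PySem.Set.mem_ofList skills skill).mpr hm)]
    simp [hm]
  · rw [List.count_eq_zero.mpr (fun h => hm ((PySem.Set.mem_ofList skills skill).mp h))]
    simp [hm]

-- B's precomputed per-name skill sets, looked up = the set of A's looked-up skill list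
theorem pv_skillsets (sk : List (String × List String)) (n : String) :
    (PySem.Dict.mk (sk.map (fun kv => (kv.1, PySem.Set.ofList kv.2)))).getD n []
      = PySem.Set.ofList ((PySem.Dict.mk sk).getD n []) := by
  induction sk with
  | nil => rfl
  | cons h t ih =>
    by_cases hk : h.1 == n
    · simp [PySem.Dict.getD, PySem.Dict.get?, hk]
    · simpa [PySem.Dict.getD, PySem.Dict.get?, hk] using ih

-- the (day, slot, skill) counter looked up = A's per-requirement counting loop
theorem pv_capable_eq (availability : List (String × String × String)) (sk : List (String × List String)) (day slot skill : String) :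
    (PySem.Dict.counter (availability.flatMap (fun p =>
        (PySem.Set.ofList ((PySem.Dict.mk sk).getD p.1 [])).map (fun s2 => (p.2.1, p.2.2, s2))))).getD (day, slot, skill) 0
      = availability.foldl (fun n p =>
          if p.2.1 == day && p.2.2 == slot && ((PySem.Dict.mk sk).getD p.1 []).contains skill then n + 1 else n) 0 := by
  rw [PySem.Dict.getD_counter, List.count_eq_countP, List.countP_flatMap, PySem.List.foldl_if_add_one]
  rw [Nat.cast_list_sum, List.map_map]
  simp only [Function.comp_def]
  rw [List.map_congr_left (fun p _ => pv_capable_elem ((PySem.Dict.mk sk).getD p.1 []) day slot skill p)]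
  rw [PySem.List.sum_map_ite_one_zero]
  simp

-- a comprehension: flatMap of a conditional singleton = filter-then-map
theorem pv_flatMap_ite {α β : Type} (p : α → Prop) [DecidablePred p] (f : α → β) (l : List α) :
    l.flatMap (fun x => if p x then [f x] else [])
      = (l.filter (fun x => decide (p x))).map f := by
  induction l with
  | nil => rfl
  | cons h t ih => by_cases hp : p h <;> simp [List.flatMap_cons, hp, ih]

-- pulling a constant prefix out of a conditional append
theorem pv_ite_append (c : Prop) [Decidable c] (r m : List String) :
    (if c then r ++ m else r) = r ++ (if c then m else []) := by
  split <;> simp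

-- B's fallback: the singleton-or-self conditional as a conditional suffix
theorem pv_fb_singleton (r : List String) (fb : String) :
    (if r.isEmpty then [fb] else r) = r ++ (if r.isEmpty then [fb] else []) := by
  cases r <;> simp

-- ===== VERDICT (by name: the statement is the Claim_ definition above) =====
theorem analyze_infeasible_spec : Claim_equal_analyze_infeasible := by
  intro availability shifts staff_constraints fixed_assignments staff_skills shift_skills _
  unfold Spec_analyze_infeasible analyze_infeasible analyze_infeasible_alt
  cases staff_skills <;> cases shift_skills <;>
    simp only [pv_supply_eq, pv_skillsets, pv_capable_eq, pv_capacity_eq, pv_min_eq,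
      Option.elim_none, Option.elim_some,
      PySem.List.foldl_append_eq_flatMap, pv_flatMap_ite, pv_ite_append,
      pv_fb_singleton, List.nil_append, List.flatten_cons, List.flatten_nil,
      List.append_nil] <;>
    simp only [List.append_assoc]
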